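-- pv_equiv track=rewrite | github.com/iasinDev/codinginterviewquestions | Shortest LR Command Sequence/Solution.py | find_command_sequence
-- ===== SOURCE A (Python) =====
-- INCOMPLETE = "incomplete"
--
-- def find_command_sequence(L, R, N, command_sequence):
--     if L == N or R == N:
--         return command_sequence
--     if abs(L) > abs(N) or abs(R) > abs(N):
--         return INCOMPLETE
--
--     resultL = find_command_sequence(2 * L - R, R, N, command_sequence + 'L')
--     resultR = find_command_sequence(L, 2 * R - L, N, command_sequence + 'R')
--
--     if resultL == INCOMPLETE and resultR == INCOMPLETE:
--         return INCOMPLETE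
--     elif resultL == INCOMPLETE:
--         return resultR
--     elif resultR == INCOMPLETE:
--         return resultL
--     else:
--         raise Exception("This should not happen")
-- ===== SOURCE B (Python) =====
-- INCOMPLETE = "incomplete"
--
-- def find_command_sequence(L, R, N, command_sequence):
--     if L == N or R == N:
--         return command_sequence
--     if abs(L) > abs(N) or abs(R) > abs(N):
--         return INCOMPLETE
--     g = R - L
--     if g == 0 or (L - N) % g != 0:
--         return INCOMPLETE
--     k = (L - N) // g
--     out = command_sequence
--     while True:
--         if k & 1:
--             out += 'L'
--             L = 2 * L - R
--         else:
--             out += 'R'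
--             R = 2 * R - L
--         k >>= 1
--         if k == 0 or k == -1:
--             return out
--         if abs(L) > abs(N) or abs(R) > abs(N):
--             return INCOMPLETE
-- ===== Notes on version B (the rewrite author's own statement) =====
-- stated objective: faster
-- what changed: Replaced the exponential two-branch recursive tree search by an O(log N) closed-form bit decomposition: since the gap g=R-L doubles each move, the whole move string is forced by the binary digits of k=(L-N)//g (bit 1 = 'L', bit 0 = 'R', stop at k in {0,-1}), checked against the same bound prune while simulating that single path.
import Mathlib
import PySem

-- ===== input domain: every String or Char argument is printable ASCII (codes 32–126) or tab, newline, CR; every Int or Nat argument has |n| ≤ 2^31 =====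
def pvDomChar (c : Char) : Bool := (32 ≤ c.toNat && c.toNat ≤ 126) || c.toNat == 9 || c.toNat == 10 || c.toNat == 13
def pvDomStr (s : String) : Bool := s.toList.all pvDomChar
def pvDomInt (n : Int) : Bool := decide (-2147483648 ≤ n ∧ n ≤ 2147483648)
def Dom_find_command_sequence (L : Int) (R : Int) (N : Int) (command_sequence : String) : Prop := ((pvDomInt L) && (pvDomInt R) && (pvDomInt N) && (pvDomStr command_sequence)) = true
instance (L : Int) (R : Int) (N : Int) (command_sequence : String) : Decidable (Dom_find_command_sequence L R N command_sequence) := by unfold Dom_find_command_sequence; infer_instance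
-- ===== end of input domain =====

-- B replaces A's exponential recursive tree search by an O(log) bit-decomposition of the
-- forced move string (objective: faster, asymptotic; confirmed).

-- ===== PORT A =====
-- Literal port of A's recursion, made total with a fuel parameter (the recursion itself is
-- unchanged). `none` = the Python raises (fuel exhausted ≈ RecursionError, or the explicit
-- `raise` in the final branch). Fuel 128 never runs out on Dom with R ≠ L, since the gap
-- R - L doubles every level, so the recursion depth is bounded by ~34 there.
def fcsAux : Nat → Int → Int → Int → String → Option String
  | 0, _, _, _, _ => none
  | fuel+1, L, R, N, cs =>
    if L = N ∨ R = N then some cs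
    else if |L| > |N| ∨ |R| > |N| then some "incomplete"
    else
      match fcsAux fuel (2*L - R) R N (cs ++ "L") with
      | none => none
      | some resultL =>
        match fcsAux fuel L (2*R - L) N (cs ++ "R") with
        | none => none
        | some resultR =>
          if resultL = "incomplete" ∧ resultR = "incomplete" then some "incomplete"
          else if resultL = "incomplete" then some resultR
          else if resultR = "incomplete" then some resultL
          else none  -- `raise Exception("This should not happen")`

def find_command_sequence (L : Int) (R : Int) (N : Int) (command_sequence : String) : String :=
  (fcsAux 128 L R N command_sequence).getD "incomplete"

-- ===== PORT B =====
-- `while True` loop of Source B: k & 1 = PySem.Int.mod k 2, k >>= 1 = floor division by 2.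
def fcsBLoop (N k L R : Int) (out : String) : String :=
  let s := if PySem.Int.mod k 2 = 1 then (out ++ "L", 2*L - R, R) else (out ++ "R", L, 2*R - L)
  let k' := PySem.Int.floordiv k 2
  if k' = 0 ∨ k' = -1 then s.1
  else if |s.2.1| > |N| ∨ |s.2.2| > |N| then "incomplete"
  else fcsBLoop N k' s.2.1 s.2.2 s.1
termination_by k.natAbs
decreasing_by
  rename_i h1 _
  have he : PySem.Int.floordiv k 2 = k / 2 := PySem.Int.floordiv_eq_ediv_of_pos (by norm_num)
  simp only [k'] at h1
  rw [he] at h1 ⊢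
  omega

def find_command_sequence_alt (L : Int) (R : Int) (N : Int) (command_sequence : String) : String :=
  if L = N ∨ R = N then command_sequence
  else if |L| > |N| ∨ |R| > |N| then "incomplete"
  else
    let g := R - L
    if g = 0 ∨ PySem.Int.mod (L - N) g ≠ 0 then "incomplete"
    else fcsBLoop N (PySem.Int.floordiv (L - N) g) L R command_sequence

-- ===== PRECONDITION & SPEC =====
-- Pre_ excludes exactly the inputs on which A raises RecursionError: L = R with L ≠ N and
-- |L| ≤ |N| leaves the state unchanged, so A recurses forever.
def Pre_find_command_sequence (L : Int) (R : Int) (N : Int) (command_sequence : String) : Prop :=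
  R = L → (L = N ∨ |N| < |L|)
instance (L : Int) (R : Int) (N : Int) (command_sequence : String) : Decidable (Pre_find_command_sequence L R N command_sequence) := by unfold Pre_find_command_sequence; infer_instance

def pvWitness_find_command_sequence : Int × Int × Int × String := (0, 1, 5, "")

def Spec_find_command_sequence (L : Int) (R : Int) (N : Int) (command_sequence : String) (out : String) : Prop := out = find_command_sequence_alt L R N command_sequence
instance (L : Int) (R : Int) (N : Int) (command_sequence : String) (out : String) : Decidable (Spec_find_command_sequence L R N command_sequence out) := by unfold Spec_find_command_sequence; infer_instance

-- ===== CLAIM (what is proved, stated in full; the proofs are below) =====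
def Claim_equal_find_command_sequence : Prop := ∀ (L : Int) (R : Int) (N : Int) (command_sequence : String), Dom_find_command_sequence L R N command_sequence → Pre_find_command_sequence L R N command_sequence → Spec_find_command_sequence L R N command_sequence (find_command_sequence L R N command_sequence)

-- ===== LEMMAS AND PROOFS =====

-- Gap arithmetic: both children of a node with gap g = R - L have gap 2g.
theorem pv_two_dvd_iff (g k : Int) (hg : g ≠ 0) : 2*g ∣ k*g ↔ 2 ∣ k := by
  constructor
  · rintro ⟨m, hm⟩
    refine ⟨m, mul_right_cancel₀ hg ?_⟩
    calc k * g = 2 * g * m := hm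
    _ = 2 * m * g := by ring
  · rintro ⟨m, hm⟩; exact ⟨m, by rw [hm]; ring⟩

-- A node whose gap does not divide L - N can never hit the target: with enough fuel its
-- whole subtree evaluates to "incomplete".
theorem fcsAux_nonDvd : ∀ (f : Nat) (L R N : Int) (cs : String), R - L ≠ 0 →
    ¬ (R - L) ∣ (L - N) → 2 * |N| < |R - L| * 2^f →
    fcsAux (f+1) L R N cs = some "incomplete" := by
  intro f
  induction f with
  | zero =>
    intro L R N cs hg hd hf
    rw [fcsAux]
    split_ifs with h1 h2
    · exfalso; rcases h1 with h | h
      · exact hd (h ▸ ⟨0, by ring⟩)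
      · exact hd ⟨-1, by rw [h]; ring⟩
    · rfl
    · exfalso
      have : |R - L| ≤ |L| + |R| := by
        calc |R - L| ≤ |R| + |L| := abs_sub R L
        _ = |L| + |R| := by ring
      simp only [pow_zero, mul_one] at hf
      have h2' := h2
      push Not at h2'
      omega
  | succ f ih =>
    intro L R N cs hg hd hf
    rw [fcsAux]
    split_ifs with h1 h2
    · exfalso; rcases h1 with h | h
      · exact hd (h ▸ ⟨0, by ring⟩)
      · exact hd ⟨-1, by rw [h]; ring⟩
    · rfl
    · have hg2 : (2:Int) * (R - L) ≠ 0 := by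
        intro h; exact hg (by linarith [h])
      have hfuel : 2 * |N| < |2 * (R - L)| * 2^f := by
        rw [abs_mul]
        have : |(2:Int)| = 2 := by decide
        rw [this]
        calc 2 * |N| < |R - L| * 2^(f+1) := hf
        _ = 2 * |R - L| * 2^f := by ring
      -- left child (2L - R, R): gap 2(R-L), offset (L-N) - (R-L)
      have hdL : ¬ (R - (2*L - R)) ∣ ((2*L - R) - N) := by
        have e1 : R - (2*L - R) = 2*(R - L) := by ring
        rw [e1]
        intro hdvd
        have h1 : (R - L) ∣ (2*(R - L)) := ⟨2, by ring⟩
        have h2 : (R - L) ∣ ((2*L - R) - N) := dvd_trans h1 hdvd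
        have e2 : L - N = ((2*L - R) - N) + (R - L) := by ring
        exact hd (e2 ▸ dvd_add h2 ⟨1, by ring⟩)
      have hdR : ¬ ((2*R - L) - L) ∣ (L - N) := by
        have e1 : (2*R - L) - L = 2*(R - L) := by ring
        rw [e1]
        intro hdvd
        exact hd (dvd_trans ⟨2, by ring⟩ hdvd)
      have rL := ih (2*L - R) R N (cs ++ "L") (by intro h; apply hg; linarith [h]) (by
        have e1 : R - (2*L - R) = 2*(R - L) := by ring
        rw [e1]; rw [e1] at hdL; exact hdL) (by
        have e1 : R - (2*L - R) = 2*(R - L) := by ring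
        rw [e1]; exact hfuel)
      have rR := ih L (2*R - L) N (cs ++ "R") (by intro h; apply hg; linarith [h]) (by
        have e1 : (2*R - L) - L = 2*(R - L) := by ring
        rw [e1]; rw [e1] at hdR; exact hdR) (by
        have e1 : (2*R - L) - L = 2*(R - L) := by ring
        rw [e1]; exact hfuel)
      rw [rL, rR]
      simp

-- Main invariant: at a divisible node with quotient k, A's search computes exactly what
-- B's bit loop computes (A's dead sibling at each level is the wrong-parity child).
-- At a divisible node, hitting the target is exactly quotient 0 (left) or -1 (right).
theorem pv_k_iff (k L R N : Int) (hg : R - L ≠ 0) (hk : L - N = k * (R - L)) :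
    (L = N ↔ k = 0) ∧ (R = N ↔ k = -1) := by
  constructor
  · constructor
    · intro h
      have h0 : k * (R - L) = 0 := by rw [← hk]; omega
      rcases mul_eq_zero.mp h0 with h' | h'
      · exact h'
      · exact absurd h' hg
    · intro h; rw [h] at hk; omega
  · constructor
    · intro h
      have h0 : k * (R - L) = -1 * (R - L) := by rw [← hk]; subst h; ring
      exact mul_right_cancel₀ hg h0
    · intro h; rw [h] at hk; omega

-- A's merge of the two child results when the left child is dead.
theorem pv_merge_L (V : String) :
    (match (some "incomplete" : Option String) with
      | none => (none : Option String)
      | some resultL =>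
        match (some V : Option String) with
        | none => none
        | some resultR =>
          if resultL = "incomplete" ∧ resultR = "incomplete" then some "incomplete"
          else if resultL = "incomplete" then some resultR
          else if resultR = "incomplete" then some resultL
          else none) = some V := by
  by_cases h : V = "incomplete" <;> simp [h]

-- A's merge of the two child results when the right child is dead.
theorem pv_merge_R (V : String) :
    (match (some V : Option String) with
      | none => (none : Option String)
      | some resultL =>
        match (some "incomplete" : Option String) with
        | none => none
        | some resultR =>
          if resultL = "incomplete" ∧ resultR = "incomplete" then some "incomplete"
          else if resultL = "incomplete" then some resultR
          else if resultR = "incomplete" then some resultL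
          else none) = some V := by
  by_cases h : V = "incomplete" <;> simp [h]

theorem fcsAux_main : ∀ (f : Nat) (k L R N : Int) (cs : String), R - L ≠ 0 →
    L - N = k * (R - L) → 2 * |N| < |R - L| * 2^f →
    fcsAux (f+1) L R N cs = some (if k = 0 ∨ k = -1 then cs
      else if |L| > |N| ∨ |R| > |N| then "incomplete" else fcsBLoop N k L R cs) := by
  intro f
  induction f with
  | zero =>
    intro k L R N cs hg hk hf
    obtain ⟨hiff0, hiff1⟩ := pv_k_iff k L R N hg hk
    rw [fcsAux]
    by_cases h1 : L = N ∨ R = N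
    · rw [if_pos h1, if_pos (by rcases h1 with h | h; exacts [Or.inl (hiff0.mp h), Or.inr (hiff1.mp h)])]
    · have hkne : ¬ (k = 0 ∨ k = -1) := by
        rintro (h | h)
        · exact h1 (Or.inl (hiff0.mpr h))
        · exact h1 (Or.inr (hiff1.mpr h))
      rw [if_neg h1, if_neg hkne]
      by_cases h2 : |L| > |N| ∨ |R| > |N|
      · rw [if_pos h2, if_pos h2]
      · exfalso
        have habs : |R - L| ≤ |L| + |R| := by
          calc |R - L| ≤ |R| + |L| := abs_sub R L
          _ = |L| + |R| := by ring
        simp only [pow_zero, mul_one] at hf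
        push Not at h2
        omega
  | succ f ih =>
    intro k L R N cs hg hk hf
    obtain ⟨hiff0, hiff1⟩ := pv_k_iff k L R N hg hk
    rw [fcsAux]
    by_cases h1 : L = N ∨ R = N
    · rw [if_pos h1, if_pos (by rcases h1 with h | h; exacts [Or.inl (hiff0.mp h), Or.inr (hiff1.mp h)])]
    · have hkne : ¬ (k = 0 ∨ k = -1) := by
        rintro (h | h)
        · exact h1 (Or.inl (hiff0.mpr h))
        · exact h1 (Or.inr (hiff1.mpr h))
      rw [if_neg h1, if_neg hkne]
      by_cases h2 : |L| > |N| ∨ |R| > |N|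
      · rw [if_pos h2, if_pos h2]
      · rw [if_neg h2, if_neg h2]
        -- recursive case: the wrong-parity child is dead, the other carries the result
        have hgL : R - (2*L - R) ≠ 0 := by intro h; apply hg; linarith
        have hgR : (2*R - L) - L ≠ 0 := by intro h; apply hg; linarith
        have eL : R - (2*L - R) = 2*(R - L) := by ring
        have eR : (2*R - L) - L = 2*(R - L) := by ring
        have hfuel : 2 * |N| < |2 * (R - L)| * 2^f := by
          rw [abs_mul]
          have h2' : |(2:Int)| = 2 := by decide
          rw [h2']
          calc 2 * |N| < |R - L| * 2^(f+1) := hf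
          _ = 2 * |R - L| * 2^f := by ring
        have hmod := PySem.Int.floordiv_mul_add_mod k 2
        rcases PySem.Int.mod_two_eq k with hm | hm
        · -- k even: move is 'R'; the 'L' child is dead
          rw [hm] at hmod
          have hdL : ¬ (R - (2*L - R)) ∣ ((2*L - R) - N) := by
            rw [eL]
            have e2 : (2*L - R) - N = (k - 1) * (R - L) := by linear_combination hk
            rw [e2, pv_two_dvd_iff (R - L) (k - 1) hg]
            omega
          have hkR : L - N = (PySem.Int.floordiv k 2) * ((2*R - L) - L) := by
            rw [eR]; linear_combination hk - (R - L) * hmod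
          have rL := fcsAux_nonDvd f (2*L - R) R N (cs ++ "L") hgL hdL (by rw [eL]; exact hfuel)
          have rR := ih (PySem.Int.floordiv k 2) L (2*R - L) N (cs ++ "R") hgR hkR
            (by rw [eR]; exact hfuel)
          have hstep : fcsBLoop N k L R cs =
              (if PySem.Int.floordiv k 2 = 0 ∨ PySem.Int.floordiv k 2 = -1 then cs ++ "R"
               else if |L| > |N| ∨ |2*R - L| > |N| then "incomplete"
               else fcsBLoop N (PySem.Int.floordiv k 2) L (2*R - L) (cs ++ "R")) := by
            rw [fcsBLoop]
            simp only [hm]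
            norm_num
          rw [rL, rR, hstep]
          exact pv_merge_L _
        · -- k odd: move is 'L'; the 'R' child is dead
          rw [hm] at hmod
          have hdR : ¬ ((2*R - L) - L) ∣ (L - N) := by
            rw [eR, hk, pv_two_dvd_iff (R - L) k hg]
            omega
          have hkL : (2*L - R) - N = (PySem.Int.floordiv k 2) * (R - (2*L - R)) := by
            rw [eL]; linear_combination hk - (R - L) * hmod
          have rR := fcsAux_nonDvd f L (2*R - L) N (cs ++ "R") hgR hdR (by rw [eR]; exact hfuel)
          have rL := ih (PySem.Int.floordiv k 2) (2*L - R) R N (cs ++ "L") hgL hkL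
            (by rw [eL]; exact hfuel)
          have hstep : fcsBLoop N k L R cs =
              (if PySem.Int.floordiv k 2 = 0 ∨ PySem.Int.floordiv k 2 = -1 then cs ++ "L"
               else if |2*L - R| > |N| ∨ |R| > |N| then "incomplete"
               else fcsBLoop N (PySem.Int.floordiv k 2) (2*L - R) R (cs ++ "L")) := by
            rw [fcsBLoop]
            simp only [hm]
            norm_num
          rw [rR, rL, hstep]
          exact pv_merge_R _

-- ===== VERDICT (by name: the statement is the Claim_ definition above) =====
theorem find_command_sequence_spec : Claim_equal_find_command_sequence := by
  intro L R N cs hD hP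
  unfold Spec_find_command_sequence
  unfold Dom_find_command_sequence pvDomInt at hD
  simp only [Bool.and_eq_true, decide_eq_true_eq] at hD
  obtain ⟨⟨⟨hDL, hDR⟩, hDN⟩, -⟩ := hD
  have habsN : |N| ≤ 2147483648 := abs_le.mpr ⟨by omega, by omega⟩
  unfold find_command_sequence find_command_sequence_alt
  by_cases hg : R - L = 0
  · -- degenerate gap: Pre_ guarantees L = N or the bound prune fires immediately
    have hRL : R = L := by omega
    by_cases hLN : L = N
    · rw [show (128:Nat) = 127+1 from rfl, fcsAux, if_pos (Or.inl hLN), if_pos (Or.inl hLN)]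
      rfl
    · rcases hP hRL with h | h
      · exact absurd h hLN
      · have h1 : ¬ (L = N ∨ R = N) := by rintro (h' | h') <;> [exact hLN h'; exact hLN (by omega)]
        have h2 : |L| > |N| ∨ |R| > |N| := Or.inl h
        rw [show (128:Nat) = 127+1 from rfl, fcsAux, if_neg h1, if_pos h2,
            if_neg h1, if_pos h2]
        rfl
  · have h1le : (1:ℤ) ≤ |R - L| := Int.one_le_abs hg
    have hf : 2 * |N| < |R - L| * 2^127 := by
      calc 2 * |N| ≤ 2 * 2147483648 := by omega
      _ < 1 * 2^127 := by norm_num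
      _ ≤ |R - L| * 2^127 := by
        apply mul_le_mul_of_nonneg_right h1le
        positivity
    by_cases hdvd : (R - L) ∣ (L - N)
    · have hm0 : PySem.Int.mod (L - N) (R - L) = 0 :=
        (PySem.Int.mod_eq_zero_iff_dvd (L - N) (R - L)).mpr hdvd
      have hk : L - N = (PySem.Int.floordiv (L - N) (R - L)) * (R - L) := by
        have := PySem.Int.floordiv_mul_add_mod (L - N) (R - L)
        rw [hm0] at this
        omega
      have hmain := fcsAux_main 127 (PySem.Int.floordiv (L - N) (R - L)) L R N cs hg hk hf
      obtain ⟨hiff0, hiff1⟩ := pv_k_iff (PySem.Int.floordiv (L - N) (R - L)) L R N hg hk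
      rw [show (128:Nat) = 127+1 from rfl, hmain]
      by_cases h1 : L = N ∨ R = N
      · rw [if_pos (by rcases h1 with h | h; exacts [Or.inl (hiff0.mp h), Or.inr (hiff1.mp h)]),
            if_pos h1]
        rfl
      · rw [if_neg (by rintro (h | h); exacts [h1 (Or.inl (hiff0.mpr h)), h1 (Or.inr (hiff1.mpr h))]),
            if_neg h1]
        by_cases h2 : |L| > |N| ∨ |R| > |N|
        · rw [if_pos h2, if_pos h2]
          rfl
        · rw [if_neg h2, if_neg h2,
              if_neg (by rintro (h | h); exacts [hg h, h hm0])]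
          rfl
    · have h1 : ¬ (L = N ∨ R = N) := by
        rintro (h | h)
        · exact hdvd (h ▸ ⟨0, by ring⟩)
        · exact hdvd ⟨-1, by rw [h]; ring⟩
      have hnon := fcsAux_nonDvd 127 L R N cs hg hdvd hf
      rw [show (128:Nat) = 127+1 from rfl, hnon, if_neg h1]
      by_cases h2 : |L| > |N| ∨ |R| > |N|
      · rw [if_pos h2]
        rfl
      · rw [if_neg h2, if_pos]
        · rfl
        · exact Or.inr (fun h => hdvd ((PySem.Int.mod_eq_zero_iff_dvd (L - N) (R - L)).mp h))
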